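-- pv_equiv track=rewrite | github.com/Niabbach/Advent-code2023 | day11/day11.py | get_horizontal_espansions
-- ===== SOURCE A (Python) =====
-- def get_horizontal_espansions(universe: list):
--     amount = 0
--     for x in range(len(universe[0])):
--         for y in range(len(universe)):
--             if universe[y][x] == '#':
--                 break
--         else:
--             amount += 1
--
--         yield amount
-- ===== SOURCE B (Python) =====
-- def get_horizontal_espansions(universe: list):
--     # Stage 1: one pass over rows building a boolean mask per column ('has a galaxy').
--     # Stage 2: one counting pass over the mask, yielding the running count of empty columns.
--     has = [False] * len(universe[0])
--     for row in universe:
--         has = [h or (x < len(row) and row[x] == '#') for x, h in enumerate(has)]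
--     amount = 0
--     for h in has:
--         if not h:
--             amount += 1
--         yield amount
-- ===== Notes on version B (the rewrite author's own statement) =====
-- stated objective: alternative
-- what changed: Instead of A's per-column scan over all rows with a break/else, B first folds the rows into a per-column boolean mask ('column has a galaxy') and then makes one counting pass over the mask.
import Mathlib
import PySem

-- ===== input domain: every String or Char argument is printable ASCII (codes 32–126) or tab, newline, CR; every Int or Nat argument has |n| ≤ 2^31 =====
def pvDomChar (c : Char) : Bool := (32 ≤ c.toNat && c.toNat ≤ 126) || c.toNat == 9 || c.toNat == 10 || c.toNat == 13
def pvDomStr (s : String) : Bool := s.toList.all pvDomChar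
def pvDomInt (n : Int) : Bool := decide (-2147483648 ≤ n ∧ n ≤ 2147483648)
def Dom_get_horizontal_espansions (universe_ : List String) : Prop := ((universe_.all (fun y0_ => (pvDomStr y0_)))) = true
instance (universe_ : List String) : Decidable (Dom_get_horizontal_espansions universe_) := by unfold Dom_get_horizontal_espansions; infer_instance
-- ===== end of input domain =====

-- B replaces A's per-column row scan (break/else) by two staged passes: fold the rows
-- into a per-column boolean mask, then one counting pass over the mask; not faster.


-- ===== PORT A =====
-- inner 'for y in range(len(universe)): if universe[y][x] == '#': break / else:' —
-- true iff some row has '#' at column x (first hit breaks)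
def pvColHasGalaxy (rows : List String) (x : Int) : Bool :=
  match rows with
  | [] => false
  | r :: rs => if PySem.Str.pyGet? r x == some '#' then true else pvColHasGalaxy rs x

def get_horizontal_espansions (universe_ : List String) : List Int :=
  ((PySem.List.pyRange 0 (PySem.Str.len (universe_.headD "")) 1).foldl
    (fun (st : Int × List Int) x =>
      let amount := if pvColHasGalaxy universe_ x then st.1 else st.1 + 1
      (amount, st.2 ++ [amount])) ((0 : Int), ([] : List Int))).2

-- ===== PORT B =====
-- '[h or (x < len(row) and row[x] == '#') for x, h in enumerate(has)]':
-- structural recursion over 'has' carrying the running index x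
def pvMark (cs : List Char) : List Bool → Int → List Bool
  | [], _ => []
  | h :: hs, x =>
      (h || (decide (x < (cs.length : Int)) && (PySem.List.pyGet? cs x == some '#')))
        :: pvMark cs hs (x + 1)

-- 'amount = 0; for h in has: if not h: amount += 1; yield amount'
def pvCount : List Bool → Int → List Int
  | [], _ => []
  | h :: hs, amount =>
      let a := if !h then amount + 1 else amount
      a :: pvCount hs a

def get_horizontal_espansions_alt (universe_ : List String) : List Int :=
  let has := universe_.foldl (fun h row => pvMark row.toList h 0)
      (List.replicate (PySem.Str.len (universe_.headD "")).toNat false)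
  pvCount has 0

-- ===== PRECONDITION & SPEC =====
-- Pre_ holds exactly where Python A returns: the list is nonempty, and whenever a
-- column scan would step past the end of a short row, an earlier row already has '#'
-- in that column (the inner loop breaks before reaching the short row).
def Pre_get_horizontal_espansions (universe_ : List String) : Prop :=
  universe_ ≠ [] ∧
  ∀ i < universe_.length, ∀ x < (universe_.headD "").toList.length,
    (universe_.getD i "").toList.length ≤ x →
      ∃ j < i, (universe_.getD j "").toList[x]? = some '#'
instance (universe_ : List String) : Decidable (Pre_get_horizontal_espansions universe_) := by unfold Pre_get_horizontal_espansions; infer_instance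
def pvWitness_get_horizontal_espansions : List String := ["#.", ".."]

def Spec_get_horizontal_espansions (universe_ : List String) (out : List Int) : Prop := out = get_horizontal_espansions_alt universe_
instance (universe_ : List String) (out : List Int) : Decidable (Spec_get_horizontal_espansions universe_ out) := by unfold Spec_get_horizontal_espansions; infer_instance

-- ===== CLAIM (what is proved, stated in full; the proofs are below) =====
def Claim_equal_get_horizontal_espansions : Prop := ∀ (universe_ : List String), Dom_get_horizontal_espansions universe_ → Pre_get_horizontal_espansions universe_ → Spec_get_horizontal_espansions universe_ (get_horizontal_espansions universe_)

-- ===== LEMMAS AND PROOFS =====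

-- A's yielding foldl is pvCount of the mapped column conditions
lemma foldl_eq_pvCount (b : Int → Bool) (xs : List Int) (a0 : Int) (out0 : List Int) :
    (xs.foldl (fun (st : Int × List Int) x =>
        let amount := if b x then st.1 else st.1 + 1
        (amount, st.2 ++ [amount])) (a0, out0)).2
      = out0 ++ pvCount (xs.map b) a0 := by
  induction xs generalizing a0 out0 with
  | nil => simp [pvCount]
  | cons x xs ih =>
    simp only [List.foldl_cons, List.map_cons, pvCount, ih]
    by_cases h : b x <;> simp [h]

-- element k of pvMark (nonnegative running index)
lemma pvMark_get (cs : List Char) (has : List Bool) (x : Int) (hx : 0 ≤ x) (k : Nat) :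
    (pvMark cs has x)[k]? = (has[k]?).map (fun h => h || (cs[x.toNat + k]? == some '#')) := by
  induction has generalizing x k with
  | nil => simp [pvMark]
  | cons h hs ih =>
    cases k with
    | zero =>
      simp only [pvMark, List.getElem?_cons_zero, Option.map_some]
      congr 1
      obtain ⟨m, rfl⟩ : ∃ m : Nat, x = (m : Int) := ⟨x.toNat, by omega⟩
      rw [PySem.List.pyGet?_natCast]
      simp only [Int.toNat_natCast, Nat.add_zero]
      by_cases hlt : m < cs.length
      · simp [hlt]
      · rw [List.getElem?_eq_none_iff.mpr (by omega)]
        simp [hlt]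
    | succ j =>
      simp only [pvMark, List.getElem?_cons_succ]
      rw [ih (x + 1) (by omega) j]
      have hidx : (x + 1).toNat + j = x.toNat + (j + 1) := by omega
      rw [hidx]
-- element k of the mask fold over the rows
lemma markFold_get (rows : List String) (has : List Bool) (k : Nat) :
    ((rows.foldl (fun h row => pvMark row.toList h 0) has))[k]?
      = (has[k]?).map (fun h => h || rows.any (fun r => r.toList[k]? == some '#')) := by
  induction rows generalizing has with
  | nil =>
    cases h : has[k]? <;> simp [h]
  | cons r rs ih =>
    rw [List.foldl_cons, ih, pvMark_get r.toList has 0 (by omega) k]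
    simp only [Int.toNat_zero, Nat.zero_add, Option.map_map, List.any_cons]
    cases h : has[k]? with
    | none => simp
    | some b =>
      simp only [Option.map_some, Function.comp_apply]
      congr 1
      cases b <;> cases hc : (r.toList[k]? == some '#') <;> simp

-- A's inner loop at a natural column index is an 'any' over the rows
lemma colHas_any (rows : List String) (k : Nat) :
    pvColHasGalaxy rows (k : Int) = rows.any (fun r => r.toList[k]? == some '#') := by
  induction rows with
  | nil => rfl
  | cons r rs ih =>
    rw [pvColHasGalaxy, PySem.Str.pyGet?_natCast, List.any_cons, ← ih]
    cases h : (r.toList[k]? == some '#') <;> simp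

-- the mapped column conditions ARE the mask
lemma map_eq_mask (universe_ : List String) :
    (PySem.List.pyRange 0 (PySem.Str.len (universe_.headD "")) 1).map (pvColHasGalaxy universe_)
      = universe_.foldl (fun h row => pvMark row.toList h 0)
          (List.replicate (PySem.Str.len (universe_.headD "")).toNat false) := by
  have h0 : (0 : Int) ≤ PySem.Str.len (universe_.headD "") := by
    simp [PySem.Str.len_eq]
  apply List.ext_getElem?
  intro k
  by_cases hk : k < (PySem.Str.len (universe_.headD "")).toNat
  · rw [markFold_get]
    rw [List.getElem?_map, PySem.List.pyRange_one]
    have hk' : k < ((PySem.Str.len (universe_.headD "")) - 0).toNat := by omega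
    simp only [List.getElem?_map, List.getElem?_range, hk']
    rw [List.getElem?_eq_getElem (by simpa using hk')]
    simp only [Option.map_some]
    have h01 : (0 : Int) + (k : Int) = (k : Int) := by omega
    rw [h01, colHas_any, List.getElem_replicate]
    simp
  · have h1 : ((PySem.List.pyRange 0 (PySem.Str.len (universe_.headD "")) 1).map
        (pvColHasGalaxy universe_))[k]? = none := by
      rw [List.getElem?_eq_none_iff]
      simp only [List.length_map, PySem.List.length_pyRange_one]
      omega
    have h2 : (universe_.foldl (fun h row => pvMark row.toList h 0)
        (List.replicate (PySem.Str.len (universe_.headD "")).toNat false))[k]? = none := by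
      rw [markFold_get, List.getElem?_eq_none_iff.mpr (by simpa using hk)]
      rfl
    rw [h1, h2]

-- the ports agree on EVERY input (Pre_ only marks where the Python A returns)
lemma ports_eq (universe_ : List String) :
    get_horizontal_espansions universe_ = get_horizontal_espansions_alt universe_ := by
  unfold get_horizontal_espansions get_horizontal_espansions_alt
  rw [foldl_eq_pvCount, map_eq_mask]
  simp

-- ===== VERDICT (by name: the statement is the Claim_ definition above) =====
theorem get_horizontal_espansions_spec : Claim_equal_get_horizontal_espansions := by
  intro universe_ _ _
  unfold Spec_get_horizontal_espansions
  exact ports_eq universe_
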